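-- pv_equiv track=rewrite | github.com/MShinigami/DSL | AS01DSL.py | low_freq
-- ===== SOURCE A (Python) =====
-- def low_freq(marks):
--     count = 0
--     ls = None
--     for i in marks:
--         if i == -1:
--             continue
--         elif ls is None or i < ls:
--             ls = i
--     if ls is not None:
--         for b in marks:
--             if b == ls:
--                 count = count + 1
--     return ls, count
-- ===== SOURCE B (Python) =====
-- def low_freq(marks):
--     ls = None
--     count = 0
--     for i in marks:
--         if i == -1:
--             continue
--         if ls is None or i < ls:
--             ls = i
--             count = 1
--         elif i == ls:
--             count = count + 1
--     return ls, count
-- ===== Notes on version B (the rewrite author's own statement) =====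
-- stated objective: simpler
-- what changed: B fuses A's two passes into one pass that maintains the running minimum together with its count (resetting the count to 1 whenever a new minimum is found), instead of first scanning for the minimum and then re-scanning to count it.
import Mathlib
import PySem

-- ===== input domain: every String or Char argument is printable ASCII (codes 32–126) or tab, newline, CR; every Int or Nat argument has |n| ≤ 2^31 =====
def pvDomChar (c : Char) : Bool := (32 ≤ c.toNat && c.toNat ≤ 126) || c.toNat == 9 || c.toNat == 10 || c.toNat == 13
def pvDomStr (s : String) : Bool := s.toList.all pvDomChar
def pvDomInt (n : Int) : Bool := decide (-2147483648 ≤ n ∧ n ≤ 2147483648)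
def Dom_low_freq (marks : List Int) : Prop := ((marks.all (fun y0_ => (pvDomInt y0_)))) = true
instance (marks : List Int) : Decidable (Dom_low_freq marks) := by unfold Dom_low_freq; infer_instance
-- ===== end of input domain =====

-- B replaces A's two passes (find min excluding -1, then recount it) by one pass
-- maintaining the running minimum together with its count; objective: simpler.

-- ===== PORT A =====
-- A's first loop: running minimum, skipping -1
def mstep (ls : Option Int) (i : Int) : Option Int :=
  if i = -1 then ls
  else match ls with
    | none => some i
    | some v => if i < v then some i else ls

def low_freq (marks : List Int) : Option Int × Int :=
  let ls := marks.foldl mstep none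
  let count : Int :=
    match ls with
    | none => 0
    | some v => marks.foldl (fun count b => if b = v then count + 1 else count) 0
  (ls, count)

-- ===== PORT B =====
-- B's single-pass step: running minimum and its count
def bstep (st : Option Int × Int) (i : Int) : Option Int × Int :=
  if i = -1 then st
  else match st.1 with
    | none => (some i, 1)
    | some v => if i < v then (some i, 1) else if i = v then (some v, st.2 + 1) else st

def low_freq_alt (marks : List Int) : Option Int × Int :=
  marks.foldl bstep (none, 0)

-- ===== PRECONDITION & SPEC =====
def Spec_low_freq (marks : List Int) (out : Option Int × Int) : Prop := out = low_freq_alt marks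
instance (marks : List Int) (out : Option Int × Int) : Decidable (Spec_low_freq marks out) := by unfold Spec_low_freq; infer_instance

-- ===== CLAIM (what is proved, stated in full; the proofs are below) =====
def Claim_equal_low_freq : Prop := ∀ (marks : List Int), Dom_low_freq marks → Spec_low_freq marks (low_freq marks)

-- ===== LEMMAS AND PROOFS =====

-- structural count of v in a list
def cntR (v : Int) : List Int → Int
  | [] => 0
  | b :: t => (if b = v then 1 else 0) + cntR v t

theorem countfold (v : Int) : ∀ (l : List Int) (c : Int),
    l.foldl (fun count b => if b = v then count + 1 else count) c = c + cntR v l := by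
  intro l
  induction l with
  | nil => intro c; simp [cntR]
  | cons b t ih =>
    intro c
    simp only [List.foldl, cntR]
    by_cases h : b = v <;> simp [h, ih] <;> ring

theorem minF_le : ∀ (t : List Int) (i w : Int),
    t.foldl mstep (some i) = some w → w ≤ i := by
  intro t
  induction t with
  | nil => intro i w h; simp at h; omega
  | cons j t ih =>
    intro i w h
    simp only [List.foldl, mstep] at h
    by_cases hj : j = -1
    · simp [hj] at h; exact ih i w h
    · simp [hj] at h
      by_cases hlt : j < i
      · simp [hlt] at h; have := ih j w h; omega
      · simp [hlt] at h; exact ih i w h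

theorem minF_some : ∀ (t : List Int) (i : Int),
    t.foldl mstep (some i) ≠ none := by
  intro t
  induction t with
  | nil => intro i h; simp at h
  | cons j t ih =>
    intro i
    simp only [List.foldl, mstep]
    by_cases hj : j = -1
    · simp [hj]; exact ih i
    · simp [hj]
      by_cases hlt : j < i
      · simp [hlt]; exact ih j
      · simp [hlt]; exact ih i

theorem minF_ne_neg1 : ∀ (t : List Int) (s : Option Int),
    s ≠ some (-1) → t.foldl mstep s ≠ some (-1) := by
  intro t
  induction t with
  | nil => intro s hs; simpa using hs
  | cons j t ih =>
    intro s hs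
    simp only [List.foldl, mstep]
    by_cases hj : j = -1
    · simp [hj]; exact ih s hs
    · simp [hj]
      cases s with
      | none => exact ih _ (by simp [hj])
      | some v =>
        by_cases hlt : j < v
        · simp [hlt]; exact ih _ (by simp [hj])
        · simp [hlt]; exact ih _ hs

-- the single-pass invariant: B's fold computes A's running minimum together with its count
theorem bfold_eq : ∀ (t : List Int) (s : Option Int) (c : Int), s ≠ some (-1) →
    t.foldl bstep (s, c) =
      (t.foldl mstep s,
       if t.foldl mstep s = s then
         c + (match s with | none => 0 | some v => cntR v t)
       else
         (match t.foldl mstep s with | none => 0 | some v => cntR v t)) := by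
  intro t
  induction t with
  | nil => intro s c _; cases s <;> simp [cntR]
  | cons i t ih =>
    intro s c hs
    simp only [List.foldl, bstep, mstep]
    by_cases hi : i = -1
    · -- skip -1
      simp only [if_pos hi]
      rw [ih s c hs]
      congr 1
      by_cases hms : t.foldl mstep s = s
      · simp only [hms, if_pos rfl]
        cases s with
        | none => simp [cntR]
        | some v =>
          have hv : v ≠ -1 := by intro h; exact hs (by rw [h])
          simp [cntR, hi, fun h : (-1:Int) = v => hv h.symm]
          intro h; omega
      · simp only [hms, if_neg hms]
        cases hm : t.foldl mstep s with
        | none => simp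
        | some w =>
          have hw : w ≠ -1 := by
            have := minF_ne_neg1 t s hs
            rw [hm] at this; intro h; exact this (by rw [h])
          simp [cntR, hi]
          intro h; omega
    · simp only [if_neg hi]
      cases s with
      | none =>
        -- fresh minimum i with count 1
        simp only
        rw [ih (some i) 1 (by simp [hi])]
        have hns := minF_some t i
        cases hm : t.foldl mstep (some i) with
        | none => exact absurd hm hns
        | some w =>
          simp only [reduceCtorEq, if_neg]
          by_cases hwi : w = i
          · subst hwi
            simp [hm, cntR]
          · have hle := minF_le t i w hm
            have hlt : w < i := lt_of_le_of_ne hle hwi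
            simp [hm, hwi, cntR]
            intro h; omega
      | some v =>
        by_cases hlt : i < v
        · -- new strict minimum i, count resets to 1
          simp only [if_pos hlt]
          rw [ih (some i) 1 (by simp [hi])]
          have hns := minF_some t i
          cases hm : t.foldl mstep (some i) with
          | none => exact absurd hm hns
          | some w =>
            have hle := minF_le t i w hm
            have hwv : w ≠ v := by omega
            simp only [Option.some.injEq, if_neg hwv]
            by_cases hwi : w = i
            · subst hwi; simp [cntR]
            · simp [cntR, hwi]
              intro h; omega
        · simp only [if_neg hlt]
          by_cases hiv : i = v
          · -- i equals current minimum: increment count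
            subst hiv
            simp only [if_neg hlt, if_pos rfl, if_true]
            rw [ih (some i) (c + 1) hs]
            congr 1
            by_cases hms : t.foldl mstep (some i) = some i
            · simp [hms, cntR]; ring
            · simp only [hms, if_neg hms]
              cases hm : t.foldl mstep (some i) with
              | none => exact absurd hm (minF_some t i)
              | some w =>
                have hle := minF_le t i w hm
                have hwi : w ≠ i := by rw [hm] at hms; simp at hms; exact hms
                simp [cntR, hwi]
                intro h; omega
          · -- i > current minimum: state unchanged
            simp only [if_neg hiv]
            rw [ih (some v) c hs]
            congr 1
            by_cases hms : t.foldl mstep (some v) = some v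
            · simp [hms, cntR, hiv]
            · simp only [hms, if_neg hms]
              cases hm : t.foldl mstep (some v) with
              | none => exact absurd hm (minF_some t v)
              | some w =>
                have hle := minF_le t v w hm
                have hwv : w ≠ v := by rw [hm] at hms; simp at hms; exact hms
                have hwi : w ≠ i := by omega
                simp [cntR, hwi]
                intro h; omega

-- ===== VERDICT (by name: the statement is the Claim_ definition above) =====
theorem low_freq_spec : Claim_equal_low_freq := by
  intro marks _
  unfold Spec_low_freq low_freq low_freq_alt
  rw [bfold_eq marks none 0 (by simp)]
  cases hm : marks.foldl mstep none with
  | none => simp [hm]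
  | some v => simp [hm, countfold]
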